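-- pv_equiv track=rewrite | github.com/Sklenik/AoC-2025 | day_02/day_02.py | findRepeatingPattern
-- ===== SOURCE A (Python) =====
-- def findRepeatingPattern(item: str)->str:
--     strlen = len(item)
--     if strlen == 1:
--         return ''
--
--     if strlen %2 != 0:
--         return ''
--
--     for i in range(1,(strlen//2)+1):
--         substr = item[0:i]
--         if item == substr + substr:
--             return substr
--
--     return ''
-- ===== SOURCE B (Python) =====
-- def findRepeatingPattern(item: str) -> str:
--     n = len(item)
--     if n % 2 != 0:
--         return ''
--     h = n // 2
--     return item[:h] if item[:h] == item[h:] else ''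
-- ===== Notes on version B (the rewrite author's own statement) =====
-- stated objective: faster
-- what changed: Only i = n/2 can satisfy item == item[:i]*2 (lengths must match), so B drops A's loop over all prefixes and directly compares the first half with the second half.
import Mathlib
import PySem

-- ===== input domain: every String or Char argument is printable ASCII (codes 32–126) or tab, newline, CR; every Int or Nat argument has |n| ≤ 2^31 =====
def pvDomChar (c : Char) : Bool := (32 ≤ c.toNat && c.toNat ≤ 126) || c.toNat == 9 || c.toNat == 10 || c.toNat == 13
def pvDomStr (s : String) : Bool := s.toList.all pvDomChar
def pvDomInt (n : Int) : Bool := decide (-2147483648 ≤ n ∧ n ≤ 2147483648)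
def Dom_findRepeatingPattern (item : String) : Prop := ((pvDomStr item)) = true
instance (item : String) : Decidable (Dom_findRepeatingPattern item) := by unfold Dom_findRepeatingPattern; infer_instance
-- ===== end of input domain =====

-- B replaces A's scan over all prefix lengths by a single comparison of the two halves
-- (only i = n/2 can make item == item[:i]*2): objective 'faster'.

-- ===== PORT A =====
-- the for-loop with early return: first i in the index list with item == item[0:i]+item[0:i]
def findRepeatingPatternLoop (s : List Char) : List Int → String
  | [] => ""
  | i :: rest =>
      let substr := PySem.List.slice s (some 0) (some i)
      if s = substr ++ substr then String.ofList substr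
      else findRepeatingPatternLoop s rest

def findRepeatingPattern (item : String) : String :=
  let s := item.toList
  let strlen : Int := PySem.Str.len item
  if strlen = 1 then ""
  else if PySem.Int.mod strlen 2 ≠ 0 then ""
  else findRepeatingPatternLoop s
         (PySem.List.pyRange 1 (PySem.Int.floordiv strlen 2 + 1) 1)

-- ===== PORT B =====
def findRepeatingPattern_alt (item : String) : String :=
  let s := item.toList
  let n := s.length
  if n % 2 ≠ 0 then ""
  else if s.take (n / 2) = s.drop (n / 2) then String.ofList (s.take (n / 2))
  else ""

-- ===== PRECONDITION & SPEC =====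
def Spec_findRepeatingPattern (item : String) (out : String) : Prop := out = findRepeatingPattern_alt item
instance (item : String) (out : String) : Decidable (Spec_findRepeatingPattern item out) := by unfold Spec_findRepeatingPattern; infer_instance

-- ===== CLAIM (what is proved, stated in full; the proofs are below) =====
def Claim_equal_findRepeatingPattern : Prop := ∀ (item : String), Dom_findRepeatingPattern item → Spec_findRepeatingPattern item (findRepeatingPattern item)

-- ===== LEMMAS AND PROOFS =====

-- indices that cannot match are skipped by the loop
theorem loop_skip (s : List Char) (l1 l2 : List Int)
    (h : ∀ i ∈ l1, s ≠ PySem.List.slice s (some 0) (some i) ++ PySem.List.slice s (some 0) (some i)) :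
    findRepeatingPatternLoop s (l1 ++ l2) = findRepeatingPatternLoop s l2 := by
  induction l1 with
  | nil => rfl
  | cons a t ih =>
      simp only [List.cons_append, findRepeatingPatternLoop]
      rw [if_neg (h a (by simp))]
      exact ih (fun i hi => h i (by simp [hi]))

-- any i with 1 ≤ i < n/2 fails: the doubled prefix is shorter than s
theorem fail_lt (s : List Char) (i : Int) (h1 : 1 ≤ i) (h2 : i < ((s.length / 2 : Nat) : Int)) :
    s ≠ PySem.List.slice s (some 0) (some i) ++ PySem.List.slice s (some 0) (some i) := by
  intro hc
  have hi0 : (0:Int) ≤ i := by omega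
  have hs : PySem.List.slice s (some 0) (some i) = s.take i.toNat := by
    rw [PySem.List.slice_zero_start, PySem.List.slice_to s hi0]
  rw [hs] at hc
  have hlen := congrArg List.length hc
  simp [List.length_take] at hlen
  omega

theorem findRepeatingPattern_eq (item : String) :
    findRepeatingPattern item = findRepeatingPattern_alt item := by
  simp only [findRepeatingPattern, findRepeatingPattern_alt, PySem.Str.len_eq]
  set s := item.toList with hsdef
  set n := s.length with hn
  have hm2 : PySem.Int.mod (n : Int) 2 = ((n % 2 : Nat) : Int) := by
    exact_mod_cast PySem.Int.mod_natCast n 2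
  by_cases hodd : n % 2 = 1
  · rw [if_pos (show n % 2 ≠ 0 by omega)]
    by_cases h1 : (n : Int) = 1
    · rw [if_pos h1]
    · rw [if_neg h1, if_pos (show PySem.Int.mod (n:Int) 2 ≠ 0 by rw [hm2]; omega)]
  · have hev : n % 2 = 0 := by omega
    have hfd : PySem.Int.floordiv (n : Int) 2 = ((n / 2 : Nat) : Int) := by
      exact_mod_cast PySem.Int.floordiv_natCast n 2
    rw [if_neg (show ¬ n % 2 ≠ 0 by omega),
        if_neg (show ¬ (n : Int) = 1 by omega),
        if_neg (show ¬ PySem.Int.mod (n:Int) 2 ≠ 0 by rw [hm2]; omega), hfd]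
    by_cases h0 : n = 0
    · have hsnil : s = [] := List.length_eq_zero_iff.mp (by omega)
      rw [hsnil, h0]
      norm_num [PySem.List.pyRange_one_eq_nil, findRepeatingPatternLoop]
    · have hh1 : (1:Int) ≤ ((n / 2 : Nat) : Int) := by omega
      rw [PySem.List.pyRange_one_append 1 ((n / 2 : Nat) : Int) (((n / 2 : Nat) : Int) + 1) hh1 (by omega),
          PySem.List.pyRange_one_singleton]
      rw [loop_skip s _ _ (fun i hi => by
        rw [PySem.List.mem_pyRange_one] at hi
        exact fail_lt s i hi.1 hi.2)]
      simp only [findRepeatingPatternLoop]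
      have hs2 : PySem.List.slice s (some 0) (some ((n / 2 : Nat) : Int)) = s.take (n / 2) := by
        rw [PySem.List.slice_zero_start, PySem.List.slice_to s (by omega), Int.toNat_natCast]
      rw [hs2]
      have hsplit : s = s.take (n / 2) ++ s.drop (n / 2) := (List.take_append_drop _ s).symm
      by_cases heq : s.take (n / 2) = s.drop (n / 2)
      · have hcpos : s = s.take (n / 2) ++ s.take (n / 2) := by
          calc s = s.take (n / 2) ++ s.drop (n / 2) := hsplit
          _ = s.take (n / 2) ++ s.take (n / 2) := by rw [← heq]
        rw [if_pos hcpos, if_pos heq]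
      · rw [if_neg (fun hc =>
          heq (List.append_cancel_left (hsplit.symm.trans hc)).symm), if_neg heq]

-- ===== VERDICT (by name: the statement is the Claim_ definition above) =====
theorem findRepeatingPattern_spec : Claim_equal_findRepeatingPattern := by
  intro item _
  exact findRepeatingPattern_eq item
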